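-- pv_equiv track=rewrite | github.com/cyundeng/hackerrant_python | set/noidea.py | happy_score
-- ===== SOURCE A (Python) =====
-- def happy_score(numbers, a, b):
--     score = 0
--     for i in numbers:
--         if i in a:
--             score += 1
--         elif i in b:
--             score -= 1
--     return score
-- ===== SOURCE B (Python) =====
-- def happy_score(numbers, a, b):
--     cnt = {}
--     for i in numbers:
--         cnt[i] = cnt.get(i, 0) + 1
--     sa = set(a)
--     sb = set(b)
--     score = 0
--     for v, c in cnt.items():
--         if v in sa:
--             score += c
--         elif v in sb:
--             score -= c
--     return score
-- ===== Notes on version B (the rewrite author's own statement) =====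
-- stated objective: alternative
-- what changed: B builds a frequency table of numbers and set-indexes a and b once, then makes one weighted pass over the distinct values, instead of A's per-element membership scans of a and b; it trades the per-element scan for a counter build plus a distinct-key pass.
import Mathlib
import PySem

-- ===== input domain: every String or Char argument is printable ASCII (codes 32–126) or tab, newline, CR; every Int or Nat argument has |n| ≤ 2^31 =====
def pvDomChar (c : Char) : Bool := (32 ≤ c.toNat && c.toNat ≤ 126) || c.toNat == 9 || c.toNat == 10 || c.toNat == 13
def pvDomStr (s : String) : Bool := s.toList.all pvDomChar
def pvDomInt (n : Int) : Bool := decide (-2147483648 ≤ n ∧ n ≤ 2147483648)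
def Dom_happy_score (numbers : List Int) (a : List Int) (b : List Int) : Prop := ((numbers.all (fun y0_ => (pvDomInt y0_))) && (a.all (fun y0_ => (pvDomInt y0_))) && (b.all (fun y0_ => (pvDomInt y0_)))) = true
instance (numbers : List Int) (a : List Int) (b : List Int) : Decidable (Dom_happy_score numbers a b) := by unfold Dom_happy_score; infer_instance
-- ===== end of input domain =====

-- ===== PORT A =====
-- A: one pass over numbers, per-element linear membership tests in a, then b.
def happy_score (numbers : List Int) (a : List Int) (b : List Int) : Int :=
  numbers.foldl (fun score i =>
    if a.contains i then score + 1
    else if b.contains i then score - 1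
    else score) 0

-- ===== PORT B =====
-- B: build a counter dict over numbers and sets of a and b, then one weighted
-- pass over the distinct values (a different traversal of the same score).
def happy_score_alt (numbers : List Int) (a : List Int) (b : List Int) : Int :=
  let cnt := numbers.foldl (fun d i => d.insert i (d.getD i 0 + 1)) PySem.Dict.empty
  let sa := PySem.Set.ofList a
  let sb := PySem.Set.ofList b
  cnt.items.foldl (fun score p =>
    if PySem.Set.contains sa p.1 then score + p.2
    else if PySem.Set.contains sb p.1 then score - p.2
    else score) 0

-- ===== PRECONDITION & SPEC =====
def Spec_happy_score (numbers : List Int) (a : List Int) (b : List Int) (out : Int) : Prop := out = happy_score_alt numbers a b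
instance (numbers : List Int) (a : List Int) (b : List Int) (out : Int) : Decidable (Spec_happy_score numbers a b out) := by unfold Spec_happy_score; infer_instance

-- ===== CLAIM (what is proved, stated in full; the proofs are below) =====
def Claim_equal_happy_score : Prop := ∀ (numbers : List Int) (a : List Int) (b : List Int), Dom_happy_score numbers a b → Spec_happy_score numbers a b (happy_score numbers a b)

-- ===== LEMMAS AND PROOFS =====

-- the per-element weight both programs realise
def hsWeight (a b : List Int) (k : Int) : Int :=
  if a.contains k then 1 else if b.contains k then -1 else 0

-- an element of a Nodup list splits off from the sum over the list with it discarded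
theorem sum_map_discard (f : Int → Int) (x : Int) (s : List Int) (hs : s.Nodup) :
    ((PySem.Set.discard s x).map f).sum + (if x ∈ s then f x else 0) = (s.map f).sum := by
  induction s with
  | nil => simp [PySem.Set.discard]
  | cons y s ih =>
    rcases List.nodup_cons.mp hs with ⟨hy, hs'⟩
    by_cases hyx : y = x
    · subst hyx
      have h1 : PySem.Set.discard (y :: s) y = s := by
        simp only [PySem.Set.discard, List.filter_cons]
        simp only [beq_self_eq_true, Bool.not_true, Bool.false_eq_true, if_false]
        exact List.filter_eq_self.mpr
          (fun a ha => by have hne : a ≠ y := fun h => hy (h ▸ ha); simp [hne])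
      rw [h1]
      simp [hy]
      ring
    · have h1 : PySem.Set.discard (y :: s) x = y :: PySem.Set.discard s x := by
        have hne : (y == x) = false := by simp [hyx]
        simp [PySem.Set.discard, hne]
      rw [h1]
      have hmem : (x ∈ y :: s) ↔ (x ∈ s) := by
        simp [List.mem_cons]; intro h; exact absurd h.symm hyx
      simp only [List.map_cons, List.sum_cons]
      rw [← ih hs']
      by_cases hx : x ∈ s
      · simp [hmem.mpr hx, hx]; ring
      · simp [hx, (hmem.not.mpr hx)]

theorem distinct_weighted_sum (w : Int → Int) (l : List Int) :
    ((PySem.Set.ofList l).map (fun k => w k * (l.count k : Int))).sum = (l.map w).sum := by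
  induction l with
  | nil => simp [PySem.Set.ofList]
  | cons x l ih =>
    rw [PySem.Set.ofList_cons]
    simp only [List.map_cons, List.sum_cons]
    have hcongr : (PySem.Set.discard (PySem.Set.ofList l) x).map
        (fun k => w k * ((x :: l).count k : Int))
        = (PySem.Set.discard (PySem.Set.ofList l) x).map (fun k => w k * (l.count k : Int)) := by
      apply List.map_congr_left
      intro k hk
      have hkx : k ≠ x := ((PySem.Set.mem_discard _ _ _).mp hk).2
      simp only [List.count_cons]
      simp
      exact Or.inl (Ne.symm hkx)
    have hd := sum_map_discard (fun k => w k * (l.count k : Int)) x (PySem.Set.ofList l)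
      (PySem.Set.nodup_ofList l)
    rw [List.count_cons_self, hcongr, ← ih, ← hd]
    by_cases hx : x ∈ l
    · have hx' : x ∈ PySem.Set.ofList l := by simp [PySem.Set.mem_ofList]; exact hx
      simp [hx']; ring
    · have h0 : l.count x = 0 := List.count_eq_zero.mpr hx
      have hx' : x ∉ PySem.Set.ofList l := by simp [PySem.Set.mem_ofList]; exact hx
      simp [hx', h0]

-- A is the sum of weights over numbers
theorem happy_score_eq_sum (numbers a b : List Int) :
    happy_score numbers a b = (numbers.map (hsWeight a b)).sum := by
  unfold happy_score
  have h : (fun (score i : Int) =>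
      if a.contains i then score + 1 else if b.contains i then score - 1 else score)
      = fun score i => score + hsWeight a b i := by
    funext s i; unfold hsWeight; split_ifs <;> ring
  rw [h, PySem.List.foldl_add, zero_add]

-- B is the same sum
theorem happy_score_alt_eq_sum (numbers a b : List Int) :
    happy_score_alt numbers a b = (numbers.map (hsWeight a b)).sum := by
  unfold happy_score_alt
  dsimp only
  rw [PySem.Dict.foldl_insert_getD_add_one_eq_counter, PySem.Dict.items_counter]
  have h : (fun (score : Int) (p : Int × Int) =>
      if PySem.Set.contains (PySem.Set.ofList a) p.1 then score + p.2
      else if PySem.Set.contains (PySem.Set.ofList b) p.1 then score - p.2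
      else score)
      = fun score p => score + hsWeight a b p.1 * p.2 := by
    funext s p
    have ha : PySem.Set.contains (PySem.Set.ofList a) p.1 = a.contains p.1 := by
      simp [PySem.Set.contains_eq_listContains]
    have hb : PySem.Set.contains (PySem.Set.ofList b) p.1 = b.contains p.1 := by
      simp [PySem.Set.contains_eq_listContains]
    rw [ha, hb]; unfold hsWeight; split_ifs <;> ring
  rw [h, PySem.List.foldl_add, zero_add, List.map_map]
  exact distinct_weighted_sum (hsWeight a b) numbers

-- ===== VERDICT (by name: the statement is the Claim_ definition above) =====
theorem happy_score_spec : Claim_equal_happy_score := by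
  intro numbers a b _
  unfold Spec_happy_score
  rw [happy_score_eq_sum, happy_score_alt_eq_sum]
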